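-- pv_equiv track=rewrite | github.com/GAUTHAMS1307/Project-Management-Software-Using-React-Typescript-Python-Node | python_analysis/csv_report_generator.py | identify_team_domain_focus
-- ===== SOURCE A (Python) =====
-- def identify_team_domain_focus(team, tasks):
--     """Identify team's primary domain focus"""
--     if not tasks:
--         return 'unknown'
--
--     domains = [t.get('domain', '') for t in tasks if t.get('domain')]
--     if domains:
--         from collections import Counter
--         return Counter(domains).most_common(1)[0][0]
--     return 'general'
-- ===== SOURCE B (Python) =====
-- def identify_team_domain_focus(team, tasks):
--     """Identify team's primary domain focus"""
--     if not tasks: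
--         return 'unknown'
--     best = None
--     best_count = 0
--     seen = set()
--     for t in tasks:
--         d = t.get('domain', '')
--         if not d or d in seen:
--             continue
--         seen.add(d)
--         c = sum(1 for u in tasks if u.get('domain', '') == d)
--         if c > best_count:
--             best, best_count = d, c
--     return best if best is not None else 'general'
-- ===== Notes on version B (the rewrite author's own statement) =====
-- stated objective: alternative
-- what changed: Replaces Counter + most_common(1) with a single streaming loop over tasks that, for each first-seen non-empty domain, counts its occurrences directly and keeps the first strict-maximum winner, with no frequency table or selection step.
import Mathlib
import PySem

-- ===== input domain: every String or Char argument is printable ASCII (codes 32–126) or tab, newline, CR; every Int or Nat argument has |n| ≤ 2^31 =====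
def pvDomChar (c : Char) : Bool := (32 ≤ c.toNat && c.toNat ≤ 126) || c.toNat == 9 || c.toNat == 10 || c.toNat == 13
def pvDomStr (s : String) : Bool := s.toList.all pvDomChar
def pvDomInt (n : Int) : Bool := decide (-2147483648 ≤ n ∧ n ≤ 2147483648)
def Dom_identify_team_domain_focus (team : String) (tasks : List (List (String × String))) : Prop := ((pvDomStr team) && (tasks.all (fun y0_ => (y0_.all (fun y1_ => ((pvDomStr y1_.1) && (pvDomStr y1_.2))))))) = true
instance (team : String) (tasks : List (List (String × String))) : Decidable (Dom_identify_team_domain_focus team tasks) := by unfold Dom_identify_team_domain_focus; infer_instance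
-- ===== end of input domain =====

-- B replaces Counter + most_common(1) with one streaming loop over tasks (first-seen domains,
-- direct counting, strict-max winner); same result is proved, no speed claim (objective: alternative).

-- shared accessor: t.get('domain', '') (Python dict -> assoc list, lookup = first match)
def pvGetDom (t : List (String × String)) : String := (PySem.Dict.mk t).getD "domain" ""

-- ===== PORT A =====
def identify_team_domain_focus (team : String) (tasks : List (List (String × String))) : String :=
  if tasks = [] then "unknown"
  else
    -- [t.get('domain', '') for t in tasks if t.get('domain')]  (truthy iff present and non-empty)
    let domains := (tasks.filter (fun t => !(pvGetDom t == ""))).map pvGetDom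
    if domains = [] then "general"
    else
      -- Counter(domains).most_common(1)[0][0]: the FIRST (insertion-order) key of maximal count
      -- (heapq.nlargest(1, items, key=count) = max by count, first-encountered winner = PySem.List.max?)
      match PySem.List.max? (PySem.Dict.counter domains).items (fun p => p.2) with
      | some p => p.1
      | none => "general"  -- unreachable: domains ≠ []

-- ===== PORT B =====
-- c = sum(1 for u in tasks if u.get('domain', '') == d)
def pvCountDom (tasks : List (List (String × String))) (d : String) : Int :=
  tasks.foldl (fun a u => if pvGetDom u == d then a + 1 else a) 0

-- one iteration of Source B's loop; state = (seen, best, best_count)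
def pvBStep (tasks : List (List (String × String)))
    (st : PySem.Set String × Option String × Int) (t : List (String × String)) :
    PySem.Set String × Option String × Int :=
  let d := pvGetDom t
  if d == "" || PySem.Set.contains st.1 d then st
  else
    let c := pvCountDom tasks d
    (PySem.Set.add st.1 d, if st.2.2 < c then (some d, c) else st.2)

def identify_team_domain_focus_alt (team : String) (tasks : List (List (String × String))) : String :=
  if tasks = [] then "unknown"
  else
    match (tasks.foldl (pvBStep tasks) (PySem.Set.empty, none, 0)).2.1 with
    | some b => b
    | none => "general"

-- ===== PRECONDITION & SPEC =====
def Spec_identify_team_domain_focus (team : String) (tasks : List (List (String × String))) (out : String) : Prop := out = identify_team_domain_focus_alt team tasks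
instance (team : String) (tasks : List (List (String × String))) (out : String) : Decidable (Spec_identify_team_domain_focus team tasks out) := by unfold Spec_identify_team_domain_focus; infer_instance

-- ===== CLAIM (what is proved, stated in full; the proofs are below) =====
def Claim_equal_identify_team_domain_focus : Prop := ∀ (team : String) (tasks : List (List (String × String))), Dom_identify_team_domain_focus team tasks → Spec_identify_team_domain_focus team tasks (identify_team_domain_focus team tasks)

-- ===== LEMMAS AND PROOFS =====

-- the fresh keys Source B's loop processes, in order, starting from `seen`
def pvKeys (seen : PySem.Set String) : List (List (String × String)) → List String
  | [] => []
  | t :: r =>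
    let d := pvGetDom t
    if d == "" || PySem.Set.contains seen d then pvKeys seen r
    else d :: pvKeys (PySem.Set.add seen d) r

-- the strict-max selection step over keys
def pvStep (f : String → Int) (p : Option String × Int) (k : String) : Option String × Int :=
  if p.2 < f k then (some k, f k) else p

theorem pvKeys_cons_skip_empty (seen : PySem.Set String) (t : List (String × String))
    (r : List (List (String × String))) (he : pvGetDom t = "") :
    pvKeys seen (t :: r) = pvKeys seen r := by
  simp [pvKeys, he]

theorem pvKeys_cons_skip_seen (seen : PySem.Set String) (t : List (String × String))
    (r : List (List (String × String))) (hc : pvGetDom t ∈ seen) :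
    pvKeys seen (t :: r) = pvKeys seen r := by
  simp [pvKeys, PySem.Set.contains, hc]

theorem pvKeys_cons_new (seen : PySem.Set String) (t : List (String × String))
    (r : List (List (String × String))) (he : pvGetDom t ≠ "") (hc : pvGetDom t ∉ seen) :
    pvKeys seen (t :: r) = pvGetDom t :: pvKeys (PySem.Set.add seen (pvGetDom t)) r := by
  simp [pvKeys, PySem.Set.contains, he, hc]

theorem pvKeys_ne_nil_mem (ts : List (List (String × String))) :
    ∀ (seen : PySem.Set String) (k : String), k ∈ pvKeys seen ts → k ≠ "" := by
  induction ts with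
  | nil => intro seen k h; simp [pvKeys] at h
  | cons t r ih =>
    intro seen k h
    by_cases he : pvGetDom t = ""
    · rw [pvKeys_cons_skip_empty seen t r he] at h
      exact ih seen k h
    · by_cases hc : pvGetDom t ∈ seen
      · rw [pvKeys_cons_skip_seen seen t r hc] at h
        exact ih seen k h
      · rw [pvKeys_cons_new seen t r he hc] at h
        rcases List.mem_cons.1 h with h | h
        · exact h ▸ he
        · exact ih _ k h

theorem pvBfold (tasks : List (List (String × String))) (rest : List (List (String × String))) :
    ∀ (seen : PySem.Set String) (p : Option String × Int),
      (rest.foldl (pvBStep tasks) (seen, p)).2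
        = (pvKeys seen rest).foldl (pvStep (pvCountDom tasks)) p := by
  induction rest with
  | nil => intro seen p; simp [pvKeys]
  | cons t r ih =>
    intro seen p
    rw [List.foldl_cons]
    by_cases he : pvGetDom t = ""
    · rw [show pvBStep tasks (seen, p) t = (seen, p) from by simp [pvBStep, he]]
      rw [pvKeys_cons_skip_empty seen t r he]
      exact ih seen p
    · by_cases hc : pvGetDom t ∈ seen
      · rw [show pvBStep tasks (seen, p) t = (seen, p) from by
              simp [pvBStep, PySem.Set.contains, he, hc]]
        rw [pvKeys_cons_skip_seen seen t r hc]
        exact ih seen p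
      · rw [show pvBStep tasks (seen, p) t
              = (PySem.Set.add seen (pvGetDom t), pvStep (pvCountDom tasks) p (pvGetDom t)) from by
              simp [pvBStep, pvStep, PySem.Set.contains, he, hc]]
        rw [pvKeys_cons_new seen t r he hc, List.foldl_cons]
        exact ih _ _

theorem pvAdd_keys (ts : List (List (String × String))) :
    ∀ (seen : PySem.Set String),
      List.foldl PySem.Set.add seen ((ts.filter (fun t => !(pvGetDom t == ""))).map pvGetDom)
        = seen ++ pvKeys seen ts := by
  induction ts with
  | nil => intro seen; simp [pvKeys]
  | cons t r ih =>
    intro seen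
    by_cases he : pvGetDom t = ""
    · rw [show ((t :: r).filter (fun t => !(pvGetDom t == ""))).map pvGetDom
            = (r.filter (fun t => !(pvGetDom t == ""))).map pvGetDom from by
            simp [List.filter_cons, he]]
      rw [pvKeys_cons_skip_empty seen t r he]
      exact ih seen
    · rw [show ((t :: r).filter (fun t => !(pvGetDom t == ""))).map pvGetDom
            = pvGetDom t :: (r.filter (fun t => !(pvGetDom t == ""))).map pvGetDom from by
            simp [List.filter_cons, he]]
      rw [List.foldl_cons]
      by_cases hc : pvGetDom t ∈ seen
      · rw [show PySem.Set.add seen (pvGetDom t) = seen from by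
              simp [PySem.Set.add, PySem.Set.contains, hc]]
        rw [pvKeys_cons_skip_seen seen t r hc]
        exact ih seen
      · rw [show PySem.Set.add seen (pvGetDom t) = seen ++ [pvGetDom t] from by
              simp [PySem.Set.add, PySem.Set.contains, hc]]
        rw [pvKeys_cons_new seen t r he hc]
        rw [show seen ++ [pvGetDom t]
              = PySem.Set.add seen (pvGetDom t) from by
              simp [PySem.Set.add, PySem.Set.contains, hc]]
        rw [ih (PySem.Set.add seen (pvGetDom t))]
        rw [show PySem.Set.add seen (pvGetDom t) = seen ++ [pvGetDom t] from by
              simp [PySem.Set.add, PySem.Set.contains, hc]]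
        simp

theorem pvCount_eq (ts : List (List (String × String))) (d : String) (hd : d ≠ "") :
    ∀ (a : Int),
      ts.foldl (fun a u => if pvGetDom u == d then a + 1 else a) a
        = a + (((ts.filter (fun t => !(pvGetDom t == ""))).map pvGetDom).count d : Int) := by
  induction ts with
  | nil => intro a; simp
  | cons t r ih =>
    intro a
    rw [List.foldl_cons]
    by_cases hq : pvGetDom t = d
    · rw [show (if (pvGetDom t == d) = true then a + 1 else a) = a + 1 from by simp [hq]]
      rw [show ((t :: r).filter (fun t => !(pvGetDom t == ""))).map pvGetDom
            = pvGetDom t :: (r.filter (fun t => !(pvGetDom t == ""))).map pvGetDom from by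
            simp [List.filter_cons, hq, hd]]
      rw [ih (a + 1), List.count_cons]
      simp only [hq, beq_self_eq_true, if_pos]
      push_cast
      ring
    · rw [show (if (pvGetDom t == d) = true then a + 1 else a) = a from by simp [hq]]
      by_cases he : pvGetDom t = ""
      · rw [show ((t :: r).filter (fun t => !(pvGetDom t == ""))).map pvGetDom
              = (r.filter (fun t => !(pvGetDom t == ""))).map pvGetDom from by
              simp [List.filter_cons, he]]
        exact ih a
      · rw [show ((t :: r).filter (fun t => !(pvGetDom t == ""))).map pvGetDom
              = pvGetDom t :: (r.filter (fun t => !(pvGetDom t == ""))).map pvGetDom from by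
              simp [List.filter_cons, he]]
        rw [ih a, List.count_cons]
        have hne : (d == pvGetDom t) = false := by
          simp only [beq_eq_false_iff_ne]
          exact fun h => hq h.symm
        simp [hq, hne]

theorem pvFoldl_congr {α β : Type} (l : List α) (f g : β → α → β) :
    (∀ b a, a ∈ l → f b a = g b a) → ∀ i, l.foldl f i = l.foldl g i := by
  induction l with
  | nil => intro _ i; rfl
  | cons x t ih =>
    intro h i
    rw [List.foldl_cons, List.foldl_cons, h i x List.mem_cons_self]
    exact ih (fun b a ha => h b a (List.mem_cons_of_mem _ ha)) _

-- A's selection: max? over the counter items, from a `some` accumulator, as a plain pair fold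
def pvMaxStep (f : String → Int) (acc : Option (String × Int)) (k : String) : Option (String × Int) :=
  match acc with
  | none => some (k, f k)
  | some m => if m.2 < f k then some (k, f k) else some m

theorem pvSelA_some (f : String → Int) (ks : List String) :
    ∀ (q : String × Int),
      List.foldl (pvMaxStep f) (some q) ks
        = some (ks.foldl (fun q k => if q.2 < f k then (k, f k) else q) q) := by
  induction ks with
  | nil => intro q; rfl
  | cons k t ih =>
    intro q
    rw [List.foldl_cons, List.foldl_cons]
    show t.foldl (pvMaxStep f) (if q.2 < f k then some (k, f k) else some q) = _
    by_cases h : q.2 < f k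
    · rw [if_pos h, if_pos h]; exact ih _
    · rw [if_neg h, if_neg h]; exact ih _

theorem pvSelB_some (f : String → Int) (ks : List String) :
    ∀ (q : String × Int),
      ks.foldl (pvStep f) (some q.1, q.2)
        = ((some (ks.foldl (fun q k => if q.2 < f k then (k, f k) else q) q).1 : Option String),
           (ks.foldl (fun q k => if q.2 < f k then (k, f k) else q) q).2) := by
  induction ks with
  | nil => intro q; rfl
  | cons k t ih =>
    intro q
    rw [List.foldl_cons, List.foldl_cons]
    show t.foldl (pvStep f) (if q.2 < f k then (some k, f k) else (some q.1, q.2)) = _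
    by_cases h : q.2 < f k
    · rw [if_pos h, if_pos h]; exact ih (k, f k)
    · rw [if_neg h, if_neg h]; exact ih q

theorem pvSel_rel (f : String → Int) (ks : List String) (hk : ∀ k ∈ ks, 1 ≤ f k) :
    ks.foldl (pvStep f) (none, 0)
      = (match List.foldl (pvMaxStep f) none ks with
         | none => ((none : Option String), (0 : Int))
         | some q => (some q.1, q.2)) := by
  cases ks with
  | nil => rfl
  | cons k t =>
    rw [List.foldl_cons, List.foldl_cons]
    have h0 : (0 : Int) < f k := lt_of_lt_of_le Int.zero_lt_one (hk k List.mem_cons_self)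
    rw [show pvStep f (none, 0) k = (some k, f k) from by simp [pvStep, h0]]
    rw [show pvMaxStep f none k = some (k, f k) from rfl]
    rw [show ((some k : Option String), f k) = (some ((k, f k) : String × Int).1, ((k, f k) : String × Int).2) from rfl]
    rw [pvSelB_some f t (k, f k), pvSelA_some f t (k, f k)]

theorem pvSelA_ne_none (f : String → Int) (ks : List String) (hne : ks ≠ []) :
    List.foldl (pvMaxStep f) none ks ≠ none := by
  cases ks with
  | nil => exact absurd rfl hne
  | cons k t =>
    rw [List.foldl_cons, show pvMaxStep f none k = some (k, f k) from rfl,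
        pvSelA_some f t (k, f k)]
    simp

-- ===== VERDICT (by name: the statement is the Claim_ definition above) =====
theorem identify_team_domain_focus_spec : Claim_equal_identify_team_domain_focus := by
  intro team tasks _
  unfold Spec_identify_team_domain_focus identify_team_domain_focus identify_team_domain_focus_alt
  by_cases ht : tasks = []
  · simp [ht]
  · rw [if_neg ht, if_neg ht]
    set ds := (tasks.filter (fun t => !(pvGetDom t == ""))).map pvGetDom with hds
    have hkeys : PySem.Set.ofList ds = pvKeys PySem.Set.empty tasks := by
      have := pvAdd_keys tasks PySem.Set.empty
      rw [PySem.Set.ofList_eq_foldl]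
      simpa [PySem.Set.empty] using this
    have hbody :
        (tasks.foldl (pvBStep tasks) (PySem.Set.empty, (none : Option String), (0 : Int))).2
          = (PySem.Set.ofList ds).foldl (pvStep (fun k => (ds.count k : Int))) (none, 0) := by
      rw [pvBfold tasks tasks PySem.Set.empty (none, 0), ← hkeys]
      apply pvFoldl_congr
      intro b k hkmem
      have hk0 : k ≠ "" := by
        rw [hkeys] at hkmem
        exact pvKeys_ne_nil_mem tasks PySem.Set.empty k hkmem
      simp only [pvStep, pvCountDom]
      rw [pvCount_eq tasks k hk0 0, ← hds]
      simp
    by_cases hd : ds = []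
    · rw [if_pos hd]
      show "general"
        = match (tasks.foldl (pvBStep tasks) (PySem.Set.empty, none, 0)).2.1 with
          | some b => b
          | none => "general"
      rw [show (tasks.foldl (pvBStep tasks) (PySem.Set.empty, (none : Option String), (0 : Int))).2.1
            = ((tasks.foldl (pvBStep tasks) (PySem.Set.empty, (none : Option String), (0 : Int))).2).1 from rfl]
      rw [hbody, hd]
      rfl
    · rw [if_neg hd]
      have h1 : ∀ k ∈ PySem.Set.ofList ds, 1 ≤ (ds.count k : Int) := by
        intro k hk
        have hmem : k ∈ ds := (PySem.Set.mem_ofList ds k).1 hk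
        have := List.count_pos_iff.2 hmem
        exact_mod_cast this
      have hmax :
          PySem.List.max? (PySem.Dict.counter ds).items (fun p => p.2)
            = List.foldl (pvMaxStep (fun k => (ds.count k : Int))) none (PySem.Set.ofList ds) := by
        rw [PySem.Dict.items_counter]
        simp only [PySem.List.max?, List.foldl_map]
        congr 1
        funext acc k
        cases acc with
        | none => rfl
        | some m => rfl
      show (match PySem.List.max? (PySem.Dict.counter ds).items (fun p => p.2) with
            | some p => p.1
            | none => "general")
        = match (tasks.foldl (pvBStep tasks) (PySem.Set.empty, none, 0)).2.1 with
          | some b => b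
          | none => "general"
      rw [show (tasks.foldl (pvBStep tasks) (PySem.Set.empty, (none : Option String), (0 : Int))).2.1
            = ((tasks.foldl (pvBStep tasks) (PySem.Set.empty, (none : Option String), (0 : Int))).2).1 from rfl]
      rw [hbody, pvSel_rel (fun k => (ds.count k : Int)) (PySem.Set.ofList ds) h1, hmax]
      have hne : PySem.Set.ofList ds ≠ [] := by
        obtain ⟨x, t, hxt⟩ := List.exists_cons_of_ne_nil hd
        intro hnil
        have hx : x ∈ PySem.Set.ofList ds :=
          (PySem.Set.mem_ofList ds x).2 (by rw [hxt]; exact List.mem_cons_self)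
        rw [hnil] at hx
        simp at hx
      cases hfold : List.foldl (pvMaxStep (fun k => (ds.count k : Int))) none (PySem.Set.ofList ds) with
      | none => exact absurd hfold (pvSelA_ne_none _ _ hne)
      | some q => rfl
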